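-- pv_equiv track=rewrite | github.com/Alain-Colombia-Arbitrage-Mev/casino | backend/roulette_analyzer.py | obtener_vecinos_en_rueda
-- ===== SOURCE A (Python) =====
-- def obtener_vecinos_en_rueda(numero_central, cantidad_vecinos, rueda):
--     """
--     Obtiene una cantidad de vecinos a cada lado de un número en la rueda.
--     Devuelve una lista de (cantidad_vecinos * 2 + 1) números.
--     """
--     try:
--         idx_central = rueda.index(numero_central)
--     except ValueError:
--         return [] # El número no está en la rueda
--
--     total_numeros_rueda = len(rueda)
--     vecinos = []
--     for i in range(-cantidad_vecinos, cantidad_vecinos + 1):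
--         idx_vecino = (idx_central + i + total_numeros_rueda) % total_numeros_rueda
--         vecinos.append(rueda[idx_vecino])
--     return vecinos
-- ===== SOURCE B (Python) =====
-- def obtener_vecinos_en_rueda(numero_central, cantidad_vecinos, rueda):
--     """
--     Same neighbours, computed as one slice of a replicated wheel instead of a
--     per-element modular loop.
--     """
--     if cantidad_vecinos < 0:
--         return []
--     if numero_central not in rueda:
--         return []
--     total = len(rueda)
--     idx = rueda.index(numero_central)
--     start = (idx - cantidad_vecinos) % total
--     span = 2 * cantidad_vecinos + 1
--     copies = -(-(start + span) // total)  # ceil((start+span)/total)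
--     return (rueda * copies)[start:start + span]
-- ===== Notes on version B (the rewrite author's own statement) =====
-- stated objective: alternative
-- what changed: Replaces the per-element loop with modular index arithmetic by a single centered slice of a replicated wheel (rueda * copies)[start:start+span], with copies chosen by a ceiling division so wraparound (even cantidad_vecinos >= len(rueda)) is covered.
import Mathlib
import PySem

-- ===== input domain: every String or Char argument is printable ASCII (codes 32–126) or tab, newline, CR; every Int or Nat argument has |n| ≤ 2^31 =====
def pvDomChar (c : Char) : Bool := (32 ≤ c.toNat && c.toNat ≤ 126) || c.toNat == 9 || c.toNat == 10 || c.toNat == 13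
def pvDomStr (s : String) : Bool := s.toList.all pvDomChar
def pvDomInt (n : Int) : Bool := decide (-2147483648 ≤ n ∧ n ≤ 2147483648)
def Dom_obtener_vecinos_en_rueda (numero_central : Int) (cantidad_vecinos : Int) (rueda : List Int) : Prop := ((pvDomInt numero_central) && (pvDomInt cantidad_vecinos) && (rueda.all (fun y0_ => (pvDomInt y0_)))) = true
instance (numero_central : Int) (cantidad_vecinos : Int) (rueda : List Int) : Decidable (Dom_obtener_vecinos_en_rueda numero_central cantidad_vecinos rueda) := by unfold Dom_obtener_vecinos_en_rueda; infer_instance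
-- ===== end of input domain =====

-- B replaces A's per-element modular loop by one centered slice of a replicated wheel (alternative decomposition, same cost).
-- ===== PORT A =====
-- try/ValueError: index? = none is Python's ValueError branch.  In the loop the computed
-- index is provably in [0, len) (mod with a positive divisor), so Python never raises
-- IndexError there; pyGetD with default 0 is exact on that range.
def obtener_vecinos_en_rueda (numero_central : Int) (cantidad_vecinos : Int) (rueda : List Int) : List Int :=
  match PySem.List.index? rueda numero_central with
  | none => []
  | some idx_central =>
    let total_numeros_rueda : Int := rueda.length
    (PySem.List.pyRange (-cantidad_vecinos) (cantidad_vecinos + 1) 1).foldl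
      (fun vecinos i =>
        vecinos ++ [PySem.List.pyGetD rueda
          (PySem.Int.mod ((idx_central : Int) + i + total_numeros_rueda) total_numeros_rueda) 0])
      []

-- ===== PORT B =====
def obtener_vecinos_en_rueda_alt (numero_central : Int) (cantidad_vecinos : Int) (rueda : List Int) : List Int :=
  if cantidad_vecinos < 0 then []
  else
    match PySem.List.index? rueda numero_central with
    | none => []
    | some idx =>
      let total : Int := rueda.length
      let start := PySem.Int.mod ((idx : Int) - cantidad_vecinos) total
      let span := 2 * cantidad_vecinos + 1
      let copies := -(PySem.Int.floordiv (-(start + span)) total)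
      PySem.List.slice (List.flatten (List.replicate copies.toNat rueda))
        (some start) (some (start + span))

-- ===== PRECONDITION & SPEC =====
def Spec_obtener_vecinos_en_rueda (numero_central : Int) (cantidad_vecinos : Int) (rueda : List Int) (out : List Int) : Prop := out = obtener_vecinos_en_rueda_alt numero_central cantidad_vecinos rueda
instance (numero_central : Int) (cantidad_vecinos : Int) (rueda : List Int) (out : List Int) : Decidable (Spec_obtener_vecinos_en_rueda numero_central cantidad_vecinos rueda out) := by unfold Spec_obtener_vecinos_en_rueda; infer_instance

-- ===== CLAIM (what is proved, stated in full; the proofs are below) =====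
def Claim_equal_obtener_vecinos_en_rueda : Prop := ∀ (numero_central : Int) (cantidad_vecinos : Int) (rueda : List Int), Dom_obtener_vecinos_en_rueda numero_central cantidad_vecinos rueda → Spec_obtener_vecinos_en_rueda numero_central cantidad_vecinos rueda (obtener_vecinos_en_rueda numero_central cantidad_vecinos rueda)

-- ===== LEMMAS AND PROOFS =====

-- flatten of replicated list indexes modularly
theorem getElem?_flatten_replicate (L : List Int) (c m : Nat) (hm : m < c * L.length) :
    (List.flatten (List.replicate c L))[m]? = L[m % L.length]? := by
  induction c generalizing m with
  | zero => omega
  | succ n ih =>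
    rw [List.replicate_succ, List.flatten_cons]
    by_cases h : m < L.length
    · rw [List.getElem?_append_left h, Nat.mod_eq_of_lt h]
    · rw [List.getElem?_append_right (by omega), ih (m - L.length) (by rw [Nat.succ_mul] at hm; omega),
        ← Nat.mod_eq_sub_mod (by omega)]

-- ===== VERDICT (by name: the statement is the Claim_ definition above) =====
theorem obtener_vecinos_en_rueda_spec : Claim_equal_obtener_vecinos_en_rueda := by
  intro nc k rueda _
  unfold Spec_obtener_vecinos_en_rueda obtener_vecinos_en_rueda obtener_vecinos_en_rueda_alt
  cases hidx : PySem.List.index? rueda nc with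
  | none => simp
  | some idx =>
      dsimp only
      by_cases hk : k < 0
      · rw [if_pos hk, PySem.List.pyRange_one_eq_nil (by omega)]
        simp
      · rw [if_neg hk]
        obtain ⟨hlt, -, -⟩ := PySem.List.getElem_of_index?_eq_some hidx
        have ht : 0 < rueda.length := by omega
        have htI : (0:Int) < (rueda.length:Int) := by exact_mod_cast ht
        set tn := rueda.length with htn
        set s := PySem.Int.mod ((idx:Int) - k) (tn:Int) with hsdef
        have hs0 : 0 ≤ s := PySem.Int.mod_nonneg _ htI
        have hsl : s < (tn:Int) := PySem.Int.mod_lt _ htI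
        set c := -(PySem.Int.floordiv (-(s + (2*k+1))) (tn:Int)) with hcdef
        have hdm := PySem.Int.floordiv_mul_add_mod (-(s + (2*k+1))) (tn:Int)
        have hm0 := PySem.Int.mod_nonneg (-(s + (2*k+1))) htI
        have hcs : s + (2*k+1) ≤ c * (tn:Int) := by
          have h1 : c * (tn:Int) = -(PySem.Int.floordiv (-(s + (2*k+1))) (tn:Int) * (tn:Int)) := by
            rw [hcdef]; ring
          linarith
        have hc0 : 0 ≤ c := by nlinarith
        have hcast : ((c.toNat * tn : Nat) : Int) = c * (tn:Int) := by
          push_cast [Int.toNat_of_nonneg hc0]; ring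
        have hbig : (List.flatten (List.replicate c.toNat rueda)).length = c.toNat * tn := by
          simp [List.length_flatten, List.map_replicate, List.sum_replicate, smul_eq_mul]
          exact Or.inl htn.symm
        have hcsN : s.toNat + (2*k+1).toNat ≤ c.toNat * tn := by omega
        -- rewrite the slice as drop/take
        have hb0 : (0:Int) ≤ s + (2*k+1) := by omega
        rw [PySem.List.slice_toNat _ hs0 hb0]
        have hspan : (s + (2*k+1)).toNat - s.toNat = (2*k+1).toNat := by omega
        rw [hspan]
        -- rewrite the loop as a map over range
        rw [PySem.List.foldl_append_singleton_eq_map, PySem.List.pyRange_one]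
        simp only [List.nil_append, List.map_map]
        have hkk : ((k + 1) - -k).toNat = (2*k+1).toNat := by omega
        rw [hkk]
        -- elementwise
        apply List.ext_getElem?
        intro j
        by_cases hj : j < (2*k+1).toNat
        · rw [List.getElem?_map, List.getElem?_range hj, Option.map_some]
          simp only [Function.comp_apply]
          rw [List.getElem?_take_of_lt hj, List.getElem?_drop,
            getElem?_flatten_replicate rueda c.toNat (s.toNat + j) (by rw [← htn]; omega),
            List.getElem?_eq_getElem (Nat.mod_lt _ ht)]
          have hidxeq : (PySem.Int.mod ((idx:Int) + (-k + (j:Int)) + (tn:Int)) (tn:Int)).toNat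
              = (s.toNat + j) % tn := by
            have hmnn := PySem.Int.mod_nonneg ((idx:Int) + (-k + (j:Int)) + (tn:Int)) htI
            have hint : PySem.Int.mod ((idx:Int) + (-k + (j:Int)) + (tn:Int)) (tn:Int)
                = (((s.toNat + j) % tn : Nat) : Int) := by
              rw [PySem.Int.mod_eq_emod_of_pos htI]
              have h2 : ((idx:Int) + (-k + (j:Int)) + (tn:Int)) = ((idx:Int) - k + (j:Int)) + (tn:Int) := by ring
              rw [h2, Int.add_emod_right]
              have h3 : (((s.toNat + j) % tn : Nat) : Int) = (s + (j:Int)) % (tn:Int) := by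
                push_cast [Int.toNat_of_nonneg hs0]
                ring_nf
              rw [h3, hsdef, PySem.Int.mod_eq_emod_of_pos htI, Int.emod_add_emod]
            omega
          have hnn : 0 ≤ PySem.Int.mod ((idx:Int) + (-k + (j:Int)) + (tn:Int)) (tn:Int) :=
            PySem.Int.mod_nonneg _ htI
          have hlt2 : PySem.Int.mod ((idx:Int) + (-k + (j:Int)) + (tn:Int)) (tn:Int) < (tn:Int) :=
            PySem.Int.mod_lt _ htI
          rw [PySem.List.pyGetD_eq_getElem _ _ hnn (by simpa [htn] using hlt2)]
          simp only [hidxeq]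
          rfl
        · rw [List.getElem?_eq_none, List.getElem?_eq_none]
          · simp only [List.length_take, List.length_drop, hbig]
            omega
          · simp only [List.length_map, List.length_range]
            omega
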